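-- pv_equiv track=rewrite | github.com/TrinhLK/BNPython | fvs-code.py | compute_fvs
-- ===== SOURCE A (Python) =====
-- def compute_fvs(boolean_network):
--     fvs = set()
--     for node in boolean_network:
--         modified_network = boolean_network.copy()
--         del modified_network[node]
--         if not has_feedback_loop(modified_network):
--             fvs.add(node)
--     return fvs
--
-- def has_feedback_loop(boolean_network):
--     for node in boolean_network:
--         if evaluate_node(node, boolean_network, set()):
--             return True
--     return False
--
-- def evaluate_node(node, boolean_network, visited):
--     if node in visited:
--         return True
--     visited.add(node)
--     function = boolean_network[node]
--     dependencies = [dep.strip() for dep in function.split('AND') + function.split('OR') + function.split('XOR')]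
--     for dep in dependencies:
--         if dep not in boolean_network:
--             continue
--         if evaluate_node(dep, boolean_network, visited):
--             return True
--     visited.remove(node)
--     return False
-- ===== SOURCE B (Python) =====
-- def compute_fvs(boolean_network):
--     # Parse each node's dependency list ONCE, then decide acyclicity of the
--     # network minus each node by fixpoint elimination of "safe" nodes
--     # (a node is safe once all of its in-network dependencies are safe),
--     # instead of restarting the exponential fresh-visited DFS per node.
--     nodes = list(boolean_network)
--     adj = {}
--     for u, f in boolean_network.items():
--         parts = f.split('AND') + f.split('OR') + f.split('XOR')
--         adj[u] = [v for v in (p.strip() for p in parts) if v in boolean_network]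
--
--     def acyclic_without(r):
--         remaining = [u for u in nodes if u != r]
--         safe = set()
--         for _ in range(len(remaining)):
--             changed = False
--             for u in remaining:
--                 if u not in safe and all(v in safe for v in adj[u] if v != r):
--                     safe.add(u)
--                     changed = True
--             if not changed:
--                 break
--         return len(safe) == len(remaining)
--
--     return {node for node in nodes if acyclic_without(node)}
-- ===== Notes on version B (the rewrite author's own statement) =====
-- stated objective: alternative
-- what changed: B parses each node's dependency list once into an adjacency map and decides acyclicity of each node-removed network by iterative fixpoint elimination of safe nodes (a node becomes safe once all its in-network dependencies are safe, with early exit on an unchanged pass), replacing A's restart, for every removed node and every start node, of an unmemoized fresh-visited-set DFS that enumerates paths.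
import Mathlib
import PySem

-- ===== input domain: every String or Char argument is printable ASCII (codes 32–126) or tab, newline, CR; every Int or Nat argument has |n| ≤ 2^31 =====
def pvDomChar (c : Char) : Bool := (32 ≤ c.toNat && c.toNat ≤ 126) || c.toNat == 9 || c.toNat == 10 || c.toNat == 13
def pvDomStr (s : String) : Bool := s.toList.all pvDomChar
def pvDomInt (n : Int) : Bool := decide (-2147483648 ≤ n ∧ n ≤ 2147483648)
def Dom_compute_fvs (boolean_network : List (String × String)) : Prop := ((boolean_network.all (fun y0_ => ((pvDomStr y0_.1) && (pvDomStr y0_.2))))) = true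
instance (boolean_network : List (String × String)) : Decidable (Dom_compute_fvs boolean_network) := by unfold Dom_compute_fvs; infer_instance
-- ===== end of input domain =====

-- B parses each node's dependency list once and decides acyclicity of each node-removed network
-- by fixpoint elimination of "safe" nodes (a node is safe once all of its in-network dependencies
-- are safe), instead of A's restart of a fresh-visited-set path-enumerating DFS from every node.

-- dependency parsing shared by both Pythons verbatim:
-- [dep.strip() for dep in function.split('AND') + function.split('OR') + function.split('XOR')]
def pvParseDeps (function : String) : List String :=
  (((PySem.Str.split? function "AND").getD []) ++ ((PySem.Str.split? function "OR").getD [])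
    ++ ((PySem.Str.split? function "XOR").getD [])).map PySem.Str.strip

-- ===== PORT A =====

-- termination measure for evaluate_node: keys of the dict not yet in `visited`
def pvMu (d : PySem.Dict String String) (visited : PySem.Set String) : Nat :=
  (d.keys.filter (fun k => !(PySem.Set.contains visited k))).length

theorem pvCountP_lt {α : Type} (p q : α → Bool) (himp : ∀ x, q x = true → p x = true)
    (n : α) (hp : p n = true) (hq : q n = false) :
    ∀ (l : List α), n ∈ l → l.countP q < l.countP p := by
  intro l
  induction l with
  | nil => intro h; exact absurd h (List.not_mem_nil)
  | cons a t ih =>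
    intro hmem
    rw [List.countP_cons, List.countP_cons]
    have hle : t.countP q ≤ t.countP p := List.countP_mono_left (fun x _ hx => himp x hx)
    rcases List.mem_cons.mp hmem with rfl | hmem
    · rw [hp, hq]
      have e1 : (if (false:Bool) = true then (1:Nat) else 0) = 0 := rfl
      have e2 : (if (true:Bool) = true then (1:Nat) else 0) = 1 := rfl
      rw [e1, e2]; omega
    · have := ih hmem
      by_cases h : q a = true
      · rw [h, himp a h]; omega
      · simp only [Bool.not_eq_true] at h; rw [h]
        have e1 : (if (false:Bool) = true then (1:Nat) else 0) = 0 := rfl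
        rw [e1]
        split <;> omega

theorem pvMu_decr (d : PySem.Dict String String) (visited : PySem.Set String) (node : String)
    (h1 : ¬ PySem.Set.contains visited node = true) (h2 : (d.get? node).isSome) :
    pvMu d (PySem.Set.add visited node) < pvMu d visited := by
  have hkey : node ∈ d.keys := by
    by_contra hk
    rw [(PySem.Dict.get?_eq_none_iff_not_mem_keys d node).mpr hk] at h2
    simp at h2
  unfold pvMu
  rw [← List.countP_eq_length_filter, ← List.countP_eq_length_filter]
  refine pvCountP_lt _ _ ?_ node ?_ ?_ _ hkey
  · intro x hx
    have hx2 : (!(PySem.Set.contains (PySem.Set.add visited node) x)) = true := hx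
    rw [Bool.not_eq_true'] at hx2
    show (!(PySem.Set.contains visited x)) = true
    rw [Bool.not_eq_true']
    cases hc : PySem.Set.contains visited x with
    | false => rfl
    | true =>
      exfalso
      have hmem : x ∈ visited := by rw [← PySem.Set.contains_iff]; exact hc
      have ht : PySem.Set.contains (PySem.Set.add visited node) x = true := by
        rw [PySem.Set.contains_iff]
        exact (PySem.Set.mem_add visited node x).mpr (Or.inl hmem)
      rw [ht] at hx2; simp at hx2
  · show (!(PySem.Set.contains visited node)) = true
    rw [Bool.not_eq_true']
    cases hcv : PySem.Set.contains visited node with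
    | false => rfl
    | true => exact absurd hcv h1
  · show (!(PySem.Set.contains (PySem.Set.add visited node) node)) = false
    have ht : PySem.Set.contains (PySem.Set.add visited node) node = true := by
      rw [PySem.Set.contains_iff]
      exact (PySem.Set.mem_add visited node node).mpr (Or.inr rfl)
    rw [ht]; rfl

mutual
-- literal port of evaluate_node (the mutated `visited` set is restored on every False return,
-- so passing it by value is exact)
def pvEvalNode (d : PySem.Dict String String) (node : String) (visited : PySem.Set String) : Bool :=
  if PySem.Set.contains visited node then true
  else
    match h2 : d.get? node with
    | none => false      -- Python's boolean_network[node] KeyError: unreachable, every caller passes a key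
    | some function => pvEvalDeps d (PySem.Set.add visited node) (pvParseDeps function)
  termination_by (pvMu d visited, 0)
  decreasing_by exact Prod.Lex.left _ _ (pvMu_decr d visited node (by assumption) (by rw [h2]; rfl))

-- the `for dep in dependencies` loop of evaluate_node
def pvEvalDeps (d : PySem.Dict String String) (visited : PySem.Set String) (deps : List String) : Bool :=
  match deps with
  | [] => false
  | dep :: rest =>
    if !(d.contains dep) then pvEvalDeps d visited rest   -- continue
    else if pvEvalNode d dep visited then true
    else pvEvalDeps d visited rest
  termination_by (pvMu d visited, deps.length + 1)
  decreasing_by all_goals exact Prod.Lex.right _ (by simp [List.length_cons]; try omega)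
end

def pvHasFeedbackLoop (d : PySem.Dict String String) : Bool :=
  d.keys.any (fun node => pvEvalNode d node PySem.Set.empty)

def compute_fvs (boolean_network : List (String × String)) : List String :=
  let d := PySem.Dict.ofList boolean_network
  d.keys.foldl (fun fvs node =>
    let modified := d.erase node
    if !(pvHasFeedbackLoop modified) then PySem.Set.add fvs node else fvs) PySem.Set.empty

-- ===== PORT B =====

-- adj[u] = [v for v in (p.strip() for p in parts) if v in boolean_network]
def pvAdjRow (d : PySem.Dict String String) (function : String) : List String :=
  (pvParseDeps function).filter (fun v => d.contains v)

def pvBuildAdj (d : PySem.Dict String String) : PySem.Dict String (List String) :=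
  d.items.foldl (fun a p => a.insert p.1 (pvAdjRow d p.2)) PySem.Dict.empty

-- one `for u in remaining` pass; the Bool is the `changed` flag
def pvPassB (adj : PySem.Dict String (List String)) (r : String) (remaining : List String)
    (st : PySem.Set String × Bool) : PySem.Set String × Bool :=
  remaining.foldl (fun st u =>
    if !(PySem.Set.contains st.1 u)
        && (((adj.getD u []).filter (fun v => v != r)).all (fun v => PySem.Set.contains st.1 v))
    then (PySem.Set.add st.1 u, true) else st) st

-- `for _ in range(len(remaining))` with break on an unchanged pass
def pvRoundsB (adj : PySem.Dict String (List String)) (r : String) (remaining : List String) :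
    Nat → PySem.Set String → PySem.Set String
  | 0, safe => safe
  | Nat.succ k, safe =>
    let res := pvPassB adj r remaining (safe, false)
    if res.2 then pvRoundsB adj r remaining k res.1 else res.1

def pvAcyclicWithout (adj : PySem.Dict String (List String)) (nodes : List String) (r : String) : Bool :=
  let remaining := nodes.filter (fun u => u != r)
  let safe := pvRoundsB adj r remaining remaining.length PySem.Set.empty
  PySem.Set.len safe == remaining.length

def compute_fvs_alt (boolean_network : List (String × String)) : List String :=
  let d := PySem.Dict.ofList boolean_network
  let nodes := d.keys
  let adj := pvBuildAdj d
  PySem.Set.ofList (nodes.filter (fun node => pvAcyclicWithout adj nodes node))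

-- ===== PRECONDITION & SPEC =====
def Spec_compute_fvs (boolean_network : List (String × String)) (out : List String) : Prop := out = compute_fvs_alt boolean_network
instance (boolean_network : List (String × String)) (out : List String) : Decidable (Spec_compute_fvs boolean_network out) := by unfold Spec_compute_fvs; infer_instance

-- ===== CLAIM (what is proved, stated in full; the proofs are below) =====
def Claim_equal_compute_fvs : Prop := ∀ (boolean_network : List (String × String)), Dom_compute_fvs boolean_network → Spec_compute_fvs boolean_network (compute_fvs boolean_network)

-- ===== LEMMAS AND PROOFS =====

-- dependency-graph edge of a network d: u → v iff v is a parsed dependency of u and v is a key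
def pvAdjE (d : PySem.Dict String String) (u : String) : List String :=
  match d.get? u with
  | none => []
  | some f => (pvParseDeps f).filter (fun v => (d.get? v).isSome)

def pvEdge (d : PySem.Dict String String) (u v : String) : Prop := v ∈ pvAdjE d u

-- what evaluate_node detects: a walk from u staying off `visited` until it hits `visited` or repeats
def pvBad (d : PySem.Dict String String) (visited : PySem.Set String) (u : String) : Prop :=
  ∃ m x, List.IsChain (pvEdge d) (u :: m ++ [x]) ∧ (∀ y ∈ u :: m, y ∉ visited)
    ∧ (x ∈ visited ∨ x ∈ u :: m)

-- the common bridge: some key starts a walk with |keys| edges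
def pvHasLong (d : PySem.Dict String String) : Prop :=
  ∃ u l, u ∈ d.keys ∧ List.IsChain (pvEdge d) (u :: l) ∧ l.length = d.keys.length

theorem pvEdge_tgt (d : PySem.Dict String String) (u v : String) (h : pvEdge d u v) :
    v ∈ d.keys ∧ (d.get? u).isSome := by
  unfold pvEdge pvAdjE at h
  cases hg : d.get? u with
  | none => rw [hg] at h; simp at h
  | some f =>
    rw [hg] at h
    have := List.of_mem_filter h
    refine ⟨?_, by simp⟩
    by_contra hk
    rw [(PySem.Dict.get?_eq_none_iff_not_mem_keys d v).mpr hk] at this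
    simp at this

theorem pvEvalDeps_spec (d : PySem.Dict String String) (visited : PySem.Set String)
    (deps : List String) :
    pvEvalDeps d visited deps = true ↔
      ∃ dep ∈ deps, d.contains dep = true ∧ pvEvalNode d dep visited = true := by
  induction deps with
  | nil =>
    rw [pvEvalDeps]
    simp
  | cons dep rest ih =>
    rw [pvEvalDeps]
    cases h : d.contains dep with
    | false =>
      rw [if_pos (by rfl), ih]
      constructor
      · rintro ⟨x, hx, hc, he⟩
        exact ⟨x, List.mem_cons_of_mem _ hx, hc, he⟩
      · rintro ⟨x, hx, hc, he⟩
        rcases List.mem_cons.mp hx with rfl | hx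
        · rw [h] at hc; cases hc
        · exact ⟨x, hx, hc, he⟩
    | true =>
      rw [if_neg (by simp)]
      cases he : pvEvalNode d dep visited with
      | true =>
        rw [if_pos rfl]
        constructor
        · intro _; exact ⟨dep, List.mem_cons_self, h, he⟩
        · intro _; rfl
      | false =>
        rw [if_neg Bool.false_ne_true, ih]
        constructor
        · rintro ⟨x, hx, hc, hev⟩
          exact ⟨x, List.mem_cons_of_mem _ hx, hc, hev⟩
        · rintro ⟨x, hx, hc, hev⟩
          rcases List.mem_cons.mp hx with rfl | hx
          · rw [he] at hev; cases hev
          · exact ⟨x, hx, hc, hev⟩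

theorem pvNotMem_of_contains_false (visited : PySem.Set String) (u : String)
    (hc : ¬ PySem.Set.contains visited u = true) : u ∉ visited := by
  intro hm
  rw [← PySem.Set.contains_iff] at hm
  exact hc hm

theorem pvEval_forward (d : PySem.Dict String String) :
    ∀ (N : Nat) (visited : PySem.Set String) (u : String), pvMu d visited ≤ N →
      pvEvalNode d u visited = true → u ∈ visited ∨ pvBad d visited u := by
  intro N
  induction N with
  | zero =>
    intro visited u hle htrue
    rw [pvEvalNode] at htrue
    by_cases hc : PySem.Set.contains visited u = true
    · left; rwa [← PySem.Set.contains_iff]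
    · rw [if_neg hc] at htrue
      cases hg : d.get? u with
      | none => rw [hg] at htrue; simp at htrue
      | some f =>
        exfalso
        have := pvMu_decr d visited u hc (by rw [hg]; rfl)
        omega
  | succ n ihn =>
    intro visited u hle htrue
    rw [pvEvalNode] at htrue
    by_cases hc : PySem.Set.contains visited u = true
    · left; rwa [← PySem.Set.contains_iff]
    · rw [if_neg hc] at htrue
      right
      have hu_nm : u ∉ visited := pvNotMem_of_contains_false visited u hc
      cases hg : d.get? u with
      | none => rw [hg] at htrue; simp at htrue
      | some f =>
        rw [hg] at htrue
        rw [pvEvalDeps_spec] at htrue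
        obtain ⟨v, hvdep, hvc, hveval⟩ := htrue
        have hdec := pvMu_decr d visited u hc (by rw [hg]; rfl)
        have hrec := ihn (PySem.Set.add visited u) v (by omega) hveval
        have hedge : pvEdge d u v := by
          unfold pvEdge pvAdjE
          rw [hg]
          exact List.mem_filter.mpr ⟨hvdep,
            by rw [← PySem.Dict.contains_eq_isSome_get?]; exact hvc⟩
        rcases hrec with hmem | hbad
        · rcases (PySem.Set.mem_add visited u v).mp hmem with hv | rfl
          · refine ⟨[], v, ?_, ?_, Or.inl hv⟩
            · exact List.isChain_cons_cons.mpr ⟨hedge, List.isChain_singleton v⟩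
            · intro y hy
              rcases List.mem_cons.mp hy with rfl | hy
              · exact hu_nm
              · exact absurd hy (List.not_mem_nil)
          · refine ⟨[], v, ?_, ?_, Or.inr List.mem_cons_self⟩
            · exact List.isChain_cons_cons.mpr ⟨hedge, List.isChain_singleton v⟩
            · intro y hy
              rcases List.mem_cons.mp hy with rfl | hy
              · exact hu_nm
              · exact absurd hy (List.not_mem_nil)
        · obtain ⟨m, x, hchain, havoid, hcond⟩ := hbad
          refine ⟨v :: m, x, ?_, ?_, ?_⟩
          · rw [List.cons_append]
            exact List.isChain_cons_cons.mpr ⟨hedge, hchain⟩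
          · intro y hy
            rcases List.mem_cons.mp hy with rfl | hy
            · exact hu_nm
            · intro hmem'
              exact havoid y hy ((PySem.Set.mem_add visited u y).mpr (Or.inl hmem'))
          · rcases hcond with hx | hx
            · rcases (PySem.Set.mem_add visited u x).mp hx with hx' | rfl
              · exact Or.inl hx'
              · exact Or.inr List.mem_cons_self
            · exact Or.inr (List.mem_cons_of_mem _ hx)

theorem pvEval_true_of_mem (d : PySem.Dict String String) (u : String)
    (visited : PySem.Set String) (h : u ∈ visited) : pvEvalNode d u visited = true := by
  rw [pvEvalNode, if_pos (by rw [PySem.Set.contains_iff]; exact h)]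

theorem pvEval_backward_base (d : PySem.Dict String String) (u x : String)
    (visited : PySem.Set String)
    (hch : List.IsChain (pvEdge d) (u :: [] ++ [x])) (havoid : ∀ y ∈ u :: ([] : List String), y ∉ visited)
    (hcond : x ∈ visited ∨ x ∈ u :: ([] : List String)) : pvEvalNode d u visited = true := by
  have hedge : pvEdge d u x := (List.isChain_cons_cons.mp hch).1
  obtain ⟨f, hf⟩ : ∃ f, d.get? u = some f :=
    Option.isSome_iff_exists.mp (pvEdge_tgt d u x hedge).2
  have hni : ¬ PySem.Set.contains visited u = true := by
    intro hcs
    exact havoid u List.mem_cons_self ((PySem.Set.contains_iff visited u).mp hcs)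
  rw [pvEvalNode, if_neg hni]
  split
  · rename_i h2
    rw [hf] at h2
    cases h2
  · rename_i fn h2
    have hfn : f = fn := by
      have := hf.symm.trans h2
      injection this
    subst hfn
    rw [pvEvalDeps_spec]
    have hxparse : x ∈ pvParseDeps f ∧ (d.get? x).isSome := by
      have hthis := hedge
      unfold pvEdge pvAdjE at hthis
      rw [hf] at hthis
      exact ⟨(List.mem_filter.mp hthis).1, (List.mem_filter.mp hthis).2⟩
    refine ⟨x, hxparse.1, by rw [PySem.Dict.contains_eq_isSome_get?]; exact hxparse.2, ?_⟩
    apply pvEval_true_of_mem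
    rcases hcond with hx | hx
    · exact (PySem.Set.mem_add visited u x).mpr (Or.inl hx)
    · rcases List.mem_cons.mp hx with rfl | hx
      · exact (PySem.Set.mem_add visited x x).mpr (Or.inr rfl)
      · exact absurd hx (List.not_mem_nil)

theorem pvEval_backward (d : PySem.Dict String String) :
    ∀ (n : Nat) (m : List String) (u x : String) (visited : PySem.Set String), m.length ≤ n →
      List.IsChain (pvEdge d) (u :: m ++ [x]) → (∀ y ∈ u :: m, y ∉ visited) →
      (x ∈ visited ∨ x ∈ u :: m) → pvEvalNode d u visited = true := by
  intro n
  induction n with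
  | zero =>
    intro m u x visited hle hch havoid hcond
    have hm : m = [] := List.eq_nil_of_length_eq_zero (by omega)
    subst hm
    exact pvEval_backward_base d u x visited hch havoid hcond
  | succ n ihn =>
    intro m u x visited hle hch havoid hcond
    cases m with
    | nil =>
      exact pvEval_backward_base d u x visited hch havoid hcond
    | cons v m' =>
      by_cases hum : u ∈ v :: m'
      · obtain ⟨a, b, hab⟩ := List.append_of_mem hum
        have hlen_a : a.length ≤ n := by
          have hcg : m'.length + 1 = a.length + 1 + b.length := by
            have := congrArg List.length hab
            simp at this
            omega
          simp at hle
          omega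
        apply ihn a u u visited hlen_a
        · apply hch.prefix
          refine ⟨b ++ [x], ?_⟩
          rw [hab]
          simp
        · intro y hy
          rcases List.mem_cons.mp hy with rfl | hy
          · exact havoid _ List.mem_cons_self
          · apply havoid
            apply List.mem_cons_of_mem
            rw [hab]
            exact List.mem_append_left _ hy
        · exact Or.inr List.mem_cons_self
      · have hcc : pvEdge d u v ∧ List.IsChain (pvEdge d) (v :: m' ++ [x]) := by
          rw [List.cons_append, List.cons_append] at hch
          exact List.isChain_cons_cons.mp hch
        obtain ⟨f, hf⟩ : ∃ f, d.get? u = some f :=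
          Option.isSome_iff_exists.mp (pvEdge_tgt d u v hcc.1).2
        have hni : ¬ PySem.Set.contains visited u = true := by
          intro hcs
          exact havoid u List.mem_cons_self ((PySem.Set.contains_iff visited u).mp hcs)
        rw [pvEvalNode, if_neg hni]
        split
        · rename_i h2
          rw [hf] at h2
          cases h2
        · rename_i fn h2
          have hfn : f = fn := by
            have := hf.symm.trans h2
            injection this
          subst hfn
          rw [pvEvalDeps_spec]
          have hvparse : v ∈ pvParseDeps f ∧ (d.get? v).isSome := by
            have hthis := hcc.1
            unfold pvEdge pvAdjE at hthis
            rw [hf] at hthis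
            exact ⟨(List.mem_filter.mp hthis).1, (List.mem_filter.mp hthis).2⟩
          refine ⟨v, hvparse.1, by rw [PySem.Dict.contains_eq_isSome_get?]; exact hvparse.2, ?_⟩
          apply ihn m' v x (PySem.Set.add visited u) (by simp at hle; omega) hcc.2
          · intro y hy hymem
            rcases (PySem.Set.mem_add visited u y).mp hymem with hy' | rfl
            · exact havoid y (List.mem_cons_of_mem _ hy) hy'
            · exact hum hy
          · rcases hcond with hx | hx
            · exact Or.inl ((PySem.Set.mem_add visited u x).mpr (Or.inl hx))
            · rcases List.mem_cons.mp hx with rfl | hx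
              · exact Or.inl ((PySem.Set.mem_add visited x x).mpr (Or.inr rfl))
              · exact Or.inr hx

theorem pvWalk_mem_keys (d : PySem.Dict String String) :
    ∀ (l : List String) (u : String), List.IsChain (pvEdge d) (u :: l) → ∀ v ∈ l, v ∈ d.keys := by
  intro l
  induction l with
  | nil => intro u _ v hv; exact absurd hv (List.not_mem_nil)
  | cons w l' ih =>
    intro u hch v hv
    have hcc := List.isChain_cons_cons.mp hch
    rcases List.mem_cons.mp hv with rfl | hv
    · exact (pvEdge_tgt d u v hcc.1).1
    · exact ih w hcc.2 v hv

theorem pvExists_dup {α : Type} [DecidableEq α] :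
    ∀ (l : List α), ¬ l.Nodup → ∃ a y b c, l = a ++ y :: b ++ y :: c := by
  intro l
  induction l with
  | nil => intro h; exact absurd List.nodup_nil h
  | cons x xs ih =>
    intro h
    by_cases hx : x ∈ xs
    · obtain ⟨s1, t1, rfl⟩ := List.append_of_mem hx
      exact ⟨[], x, s1, t1, rfl⟩
    · have hxs : ¬ xs.Nodup := by
        intro hnd
        exact h (List.nodup_cons.mpr ⟨hx, hnd⟩)
      obtain ⟨a, y, b, c, rfl⟩ := ih hxs
      exact ⟨x :: a, y, b, c, rfl⟩

theorem pvBad_of_HasLong (d : PySem.Dict String String) (hnd : d.keys.Nodup)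
    (u : String) (l : List String) (hu : u ∈ d.keys)
    (hch : List.IsChain (pvEdge d) (u :: l)) (hlen : l.length = d.keys.length) :
    pvBad d PySem.Set.empty u := by
  have hall : ∀ v ∈ u :: l, v ∈ d.keys := by
    intro v hv
    rcases List.mem_cons.mp hv with rfl | hv
    · exact hu
    · exact pvWalk_mem_keys d l u hch v hv
  have hnnd : ¬ (u :: l).Nodup := by
    intro hnodup
    have := (List.subperm_of_subset hnodup hall).length_le
    simp [hlen] at this
  obtain ⟨a, y, b, c, hsplit⟩ := pvExists_dup (u :: l) hnnd
  have hpre : List.IsChain (pvEdge d) ((a ++ y :: b) ++ [y]) := by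
    apply (hsplit ▸ hch).prefix
    exact ⟨c, by simp⟩
  cases a with
  | nil =>
    have huy : u = y := by
      simp at hsplit
      exact hsplit.1
    subst huy
    refine ⟨b, u, by simpa using hpre, ?_, Or.inr List.mem_cons_self⟩
    intro y hy
    simp [PySem.Set.empty]
  | cons a0 a' =>
    have hu0 : u = a0 := by
      simp at hsplit
      exact hsplit.1
    subst hu0
    refine ⟨a' ++ y :: b, y, by simpa using hpre, ?_, ?_⟩
    · intro z hz
      simp [PySem.Set.empty]
    · refine Or.inr (List.mem_cons_of_mem _ ?_)
      exact List.mem_append_right _ List.mem_cons_self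

theorem pvPump (d : PySem.Dict String String) (x : String) (c : List String)
    (hcch : List.IsChain (pvEdge d) (x :: c)) (hcne : c ≠ [])
    (hlast : (x :: c).getLast? = some x) :
    ∀ k, ∃ w, List.IsChain (pvEdge d) (x :: w) ∧ (x :: w).getLast? = some x ∧ k ≤ w.length := by
  intro k
  induction k with
  | zero => exact ⟨[], List.isChain_singleton x, by simp, by simp⟩
  | succ k ih =>
    obtain ⟨w, h1, h2, h3⟩ := ih
    refine ⟨w ++ c, ?_, ?_, ?_⟩
    · rw [show x :: (w ++ c) = (x :: w) ++ c from by simp]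
      rw [List.isChain_append]
      refine ⟨h1, hcch.tail, ?_⟩
      intro p hp q hq
      have hp' : p = x := by
        rw [h2] at hp
        simp at hp
        exact hp.symm
      subst hp'
      cases c with
      | nil => exact absurd rfl hcne
      | cons c0 ct =>
        have hq' : q = c0 := by
          simp at hq
          exact hq.symm
        subst hq'
        exact (List.isChain_cons_cons.mp hcch).1
    · rw [show x :: (w ++ c) = (x :: w) ++ c from by simp]
      rw [List.getLast?_append_of_ne_nil _ hcne]
      rw [show (x :: c).getLast? = c.getLast? from by
        cases c with
        | nil => exact absurd rfl hcne
        | cons c0 ct => simp] at hlast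
      exact hlast
    · have := List.length_pos_of_ne_nil hcne
      simp
      omega

theorem pvHasLong_of_Bad (d : PySem.Dict String String) (u : String) (hu : u ∈ d.keys)
    (hb : pvBad d PySem.Set.empty u) : pvHasLong d := by
  obtain ⟨m, x, hch, _, hcond⟩ := hb
  have hxm : x ∈ u :: m := by
    rcases hcond with hx | hx
    · simp [PySem.Set.empty] at hx
    · exact hx
  obtain ⟨a, b, hab⟩ := List.append_of_mem hxm
  have hW : List.IsChain (pvEdge d) (a ++ x :: (b ++ [x])) := by
    have : u :: m ++ [x] = a ++ x :: (b ++ [x]) := by rw [hab]; simp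
    exact this ▸ hch
  have hcyc : List.IsChain (pvEdge d) (x :: (b ++ [x])) := by
    apply hW.suffix
    exact ⟨a, rfl⟩
  have hlast : (x :: (b ++ [x])).getLast? = some x := by
    rw [show x :: (b ++ [x]) = (x :: b) ++ [x] from by simp]
    exact List.getLast?_concat
  obtain ⟨w, hw1, hw2, hw3⟩ := pvPump d x (b ++ [x]) hcyc (by simp) hlast d.keys.length
  -- the long walk a ++ x :: w, whose head is u
  have hL : List.IsChain (pvEdge d) (a ++ x :: w) := by
    rw [show a ++ x :: w = (a ++ [x]) ++ w from by simp]
    rw [List.isChain_append]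
    refine ⟨?_, hw1.tail, ?_⟩
    · apply hW.prefix
      exact ⟨b ++ [x], by simp⟩
    · intro p hp q hq
      have hp' : p = x := by
        rw [List.getLast?_concat] at hp
        simp at hp
        exact hp.symm
      subst hp'
      cases w with
      | nil => simp at hq
      | cons w0 wt =>
        have hq' : q = w0 := by
          simp at hq
          exact hq.symm
        subst hq'
        exact (List.isChain_cons_cons.mp hw1).1
  -- write a ++ x :: w as u :: t
  have hhead : ∃ t, a ++ x :: w = u :: t ∧ d.keys.length ≤ t.length := by
    cases a with
    | nil =>
      have hux : u = x := by
        simp at hab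
        exact hab.1
      exact ⟨w, by rw [hux]; rfl, hw3⟩
    | cons a0 a' =>
      have hu0 : u = a0 := by
        simp at hab
        exact hab.1
      refine ⟨a' ++ x :: w, by rw [hu0]; rfl, ?_⟩
      simp
      omega
  obtain ⟨t, hteq, htlen⟩ := hhead
  rw [hteq] at hL
  refine ⟨u, t.take d.keys.length, hu, ?_, ?_⟩
  · have := hL.take (d.keys.length + 1)
    rwa [List.take_succ_cons] at this
  · rw [List.length_take]
    omega

theorem pvHasFeedbackLoop_iff (d : PySem.Dict String String) (hnd : d.keys.Nodup) :
    pvHasFeedbackLoop d = true ↔ pvHasLong d := by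
  unfold pvHasFeedbackLoop
  rw [List.any_eq_true]
  constructor
  · rintro ⟨u, hu, heval⟩
    rcases pvEval_forward d (pvMu d PySem.Set.empty) PySem.Set.empty u le_rfl heval with hmem | hbad
    · simp [PySem.Set.empty] at hmem
    · exact pvHasLong_of_Bad d u hu hbad
  · rintro ⟨u, l, hu, hch, hlen⟩
    refine ⟨u, hu, ?_⟩
    obtain ⟨m, x, h1, h2, h3⟩ := pvBad_of_HasLong d hnd u l hu hch hlen
    exact pvEval_backward d m.length m u x PySem.Set.empty le_rfl h1 h2 h3

-- ---- B side ----

def pvSuccP (adj : PySem.Dict String (List String)) (r : String) (u : String) : List String :=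
  (adj.getD u []).filter (fun v => v != r)

def pvE' (adj : PySem.Dict String (List String)) (r : String) (u v : String) : Prop :=
  v ∈ pvSuccP adj r u

-- every element of `safe` has all its successors strictly earlier in `safe`
def pvRanked (adj : PySem.Dict String (List String)) (r : String) (s : List String) : Prop :=
  ∀ (i : Nat) (hi : i < s.length), ∀ v ∈ pvSuccP adj r s[i], v ∈ s.take i

def pvStepB (adj : PySem.Dict String (List String)) (r : String)
    (st : PySem.Set String × Bool) (u : String) : PySem.Set String × Bool :=
  if !(PySem.Set.contains st.1 u)
      && (((adj.getD u []).filter (fun v => v != r)).all (fun v => PySem.Set.contains st.1 v))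
  then (PySem.Set.add st.1 u, true) else st

theorem pvPassB_cons (adj : PySem.Dict String (List String)) (r u : String)
    (rest : List String) (st : PySem.Set String × Bool) :
    pvPassB adj r (u :: rest) st = pvPassB adj r rest (pvStepB adj r st u) := rfl

theorem pvPassB_nil (adj : PySem.Dict String (List String)) (r : String)
    (st : PySem.Set String × Bool) : pvPassB adj r [] st = st := rfl

theorem pvStepB_cases (adj : PySem.Dict String (List String)) (r : String)
    (st : PySem.Set String × Bool) (u : String) :
    pvStepB adj r st u = st ∨
      (u ∉ st.1 ∧ (∀ v ∈ pvSuccP adj r u, v ∈ st.1) ∧ pvStepB adj r st u = (st.1 ++ [u], true)) := by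
  unfold pvStepB
  split
  · rename_i hg
    rw [Bool.and_eq_true] at hg
    obtain ⟨hg1, hg2⟩ := hg
    rw [Bool.not_eq_true'] at hg1
    have hnm : u ∉ st.1 := by
      intro hm
      rw [← PySem.Set.contains_iff] at hm
      rw [hm] at hg1; cases hg1
    refine Or.inr ⟨hnm, ?_, ?_⟩
    · intro v hv
      rw [List.all_eq_true] at hg2
      have := hg2 v hv
      rw [← PySem.Set.contains_iff]; exact this
    · rw [PySem.Set.add_of_not_mem hnm]
  · exact Or.inl rfl

theorem pvStepB_mem (adj : PySem.Dict String (List String)) (r : String)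
    (st : PySem.Set String × Bool) (u x : String) (hx : x ∈ st.1) :
    x ∈ (pvStepB adj r st u).1 := by
  rcases pvStepB_cases adj r st u with h | ⟨_, _, h⟩ <;> rw [h]
  · exact hx
  · exact List.mem_append_left _ hx

theorem pvPassB_append (adj : PySem.Dict String (List String)) (r : String) :
    ∀ (rem : List String) (st : PySem.Set String × Bool),
      ∃ t, (pvPassB adj r rem st).1 = st.1 ++ t ∧ ∀ y ∈ t, y ∈ rem := by
  intro rem
  induction rem with
  | nil => intro st; exact ⟨[], by simp [pvPassB_nil], by simp⟩
  | cons u rest ih =>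
    intro st
    rw [pvPassB_cons]
    obtain ⟨t, ht, hsub⟩ := ih (pvStepB adj r st u)
    rcases pvStepB_cases adj r st u with h | ⟨_, _, h⟩
    · exact ⟨t, by rw [ht, h], fun y hy => List.mem_cons_of_mem _ (hsub y hy)⟩
    · refine ⟨u :: t, ?_, ?_⟩
      · rw [ht, h]; simp
      · intro y hy
        rcases List.mem_cons.mp hy with rfl | hy
        · exact List.mem_cons_self
        · exact List.mem_cons_of_mem _ (hsub y hy)

theorem pvPassB_mem_mono (adj : PySem.Dict String (List String)) (r : String)
    (rem : List String) (st : PySem.Set String × Bool) (x : String) (hx : x ∈ st.1) :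
    x ∈ (pvPassB adj r rem st).1 := by
  obtain ⟨t, ht, _⟩ := pvPassB_append adj r rem st
  rw [ht]; exact List.mem_append_left _ hx

theorem pvPassB_flag_mono (adj : PySem.Dict String (List String)) (r : String) :
    ∀ (rem : List String) (st : PySem.Set String × Bool), st.2 = true →
      (pvPassB adj r rem st).2 = true := by
  intro rem
  induction rem with
  | nil => intro st h; rw [pvPassB_nil]; exact h
  | cons u rest ih =>
    intro st h
    rw [pvPassB_cons]
    apply ih
    rcases pvStepB_cases adj r st u with hc | ⟨_, _, hc⟩
    · rw [hc]; exact h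
    · rw [hc]

theorem pvPassB_flag_false (adj : PySem.Dict String (List String)) (r : String) :
    ∀ (rem : List String) (st : PySem.Set String × Bool), (pvPassB adj r rem st).2 = false →
      (pvPassB adj r rem st).1 = st.1 := by
  intro rem
  induction rem with
  | nil => intro st _; rw [pvPassB_nil]
  | cons u rest ih =>
    intro st hf
    rw [pvPassB_cons] at hf ⊢
    rcases pvStepB_cases adj r st u with hc | ⟨_, _, hc⟩
    · rw [hc] at hf ⊢; exact ih st hf
    · exfalso
      rw [hc] at hf
      rw [pvPassB_flag_mono adj r rest _ rfl] at hf
      cases hf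

theorem pvPassB_growth (adj : PySem.Dict String (List String)) (r : String) :
    ∀ (rem : List String) (st : PySem.Set String × Bool), (pvPassB adj r rem st).2 = true →
      st.2 = true ∨ st.1.length < (pvPassB adj r rem st).1.length := by
  intro rem
  induction rem with
  | nil => intro st h; rw [pvPassB_nil] at h; exact Or.inl h
  | cons u rest ih =>
    intro st h
    rw [pvPassB_cons] at h ⊢
    rcases pvStepB_cases adj r st u with hc | ⟨_, _, hc⟩
    · rw [hc] at h ⊢; exact ih st h
    · right
      obtain ⟨t, ht, _⟩ := pvPassB_append adj r rest (pvStepB adj r st u)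
      rw [ht, hc]
      simp [List.length_append]

theorem pvFull_fix (adj : PySem.Dict String (List String)) (r : String) :
    ∀ (rem : List String) (S : PySem.Set String), (∀ u ∈ rem, u ∈ S) →
      pvPassB adj r rem (S, false) = (S, false) := by
  intro rem
  induction rem with
  | nil => intro S _; rw [pvPassB_nil]
  | cons u rest ih =>
    intro S hall
    rw [pvPassB_cons]
    have hstep : pvStepB adj r (S, false) u = (S, false) := by
      unfold pvStepB
      have hm : PySem.Set.contains S u = true := by
        rw [PySem.Set.contains_iff]; exact hall u List.mem_cons_self
      rw [hm]; rfl
    rw [hstep]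
    exact ih S (fun v hv => hall v (List.mem_cons_of_mem _ hv))

theorem pvPassB_reach (adj : PySem.Dict String (List String)) (r : String) :
    ∀ (rem : List String) (st : PySem.Set String × Bool) (u : String), u ∈ rem →
      (u ∈ st.1 ∨ ∀ v ∈ pvSuccP adj r u, v ∈ st.1) → u ∈ (pvPassB adj r rem st).1 := by
  intro rem
  induction rem with
  | nil => intro st u h; exact absurd h (List.not_mem_nil)
  | cons w rest ih =>
    intro st u hu hcond
    rw [pvPassB_cons]
    rcases List.mem_cons.mp hu with rfl | hu
    · -- u is processed now: afterwards u ∈ (step st u).1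
      have : u ∈ (pvStepB adj r st u).1 := by
        by_cases hm : u ∈ st.1
        · exact pvStepB_mem adj r st u u hm
        · rcases hcond with hm' | hsucc
          · exact absurd hm' hm
          · have hg1 : (!(PySem.Set.contains st.1 u)) = true := by
              rw [Bool.not_eq_true']
              cases hcs : PySem.Set.contains st.1 u with
              | false => rfl
              | true => exact absurd ((PySem.Set.contains_iff st.1 u).mp hcs) hm
            have hg2 : (((adj.getD u []).filter (fun v => v != r)).all
                (fun v => PySem.Set.contains st.1 v)) = true := by
              rw [List.all_eq_true]
              intro v hv
              rw [PySem.Set.contains_iff]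
              exact hsucc v (show v ∈ pvSuccP adj r u from hv)
            have hfire : pvStepB adj r st u = (PySem.Set.add st.1 u, true) := by
              unfold pvStepB
              rw [if_pos (by rw [Bool.and_eq_true]; exact ⟨hg1, hg2⟩)]
            rw [hfire]
            exact (PySem.Set.mem_add st.1 u u).mpr (Or.inr rfl)
      exact pvPassB_mem_mono adj r rest _ u this
    · apply ih _ u hu
      rcases hcond with hm | hsucc
      · exact Or.inl (pvStepB_mem adj r st w u hm)
      · exact Or.inr (fun v hv => pvStepB_mem adj r st w v (hsucc v hv))

theorem pvRanked_snoc (adj : PySem.Dict String (List String)) (r : String)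
    (s : List String) (u : String) (hr : pvRanked adj r s)
    (hsucc : ∀ v ∈ pvSuccP adj r u, v ∈ s) : pvRanked adj r (s ++ [u]) := by
  intro i hi v hv
  by_cases hlt : i < s.length
  · rw [List.getElem_append_left hlt] at hv
    rw [List.take_append_of_le_length (by omega)]
    exact hr i hlt v hv
  · have hie : i = s.length := by
      have : i < s.length + 1 := by simpa using hi
      omega
    subst hie
    rw [List.getElem_concat_length rfl] at hv
    rw [List.take_left]
    exact hsucc v hv

theorem pvPassB_ranked (adj : PySem.Dict String (List String)) (r : String) :
    ∀ (rem : List String) (st : PySem.Set String × Bool),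
      pvRanked adj r st.1 → st.1.Nodup →
      pvRanked adj r (pvPassB adj r rem st).1 ∧ (pvPassB adj r rem st).1.Nodup := by
  intro rem
  induction rem with
  | nil => intro st h1 h2; rw [pvPassB_nil]; exact ⟨h1, h2⟩
  | cons u rest ih =>
    intro st h1 h2
    rw [pvPassB_cons]
    rcases pvStepB_cases adj r st u with hc | ⟨hnm, hsucc, hc⟩
    · rw [hc]; exact ih st h1 h2
    · apply ih
      · rw [hc]; exact pvRanked_snoc adj r st.1 u h1 hsucc
      · rw [hc]
        show (st.1 ++ [u]).Nodup
        simp [List.nodup_append, h2]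
        exact fun a ha he => hnm (he ▸ ha)


theorem pvRanked_sound (adj : PySem.Dict String (List String)) (r : String) (s : List String)
    (hr : pvRanked adj r s) :
    ∀ (n i : Nat) (hi : i < s.length), i ≤ n →
      ∀ l, List.IsChain (pvE' adj r) (s[i] :: l) → l.length ≤ i := by
  intro n
  induction n with
  | zero =>
    intro i hi hin l hch
    cases l with
    | nil => simp
    | cons v l' =>
      exfalso
      have hv : pvE' adj r s[i] v := (List.isChain_cons_cons.mp hch).1
      have := hr i hi v hv
      interval_cases i
      simp at this
  | succ n ihn =>
    intro i hi hin l hch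
    cases l with
    | nil => simp
    | cons v l' =>
      have hcc := List.isChain_cons_cons.mp hch
      have hvt := hr i hi v hcc.1
      rw [List.mem_take_iff_getElem] at hvt
      obtain ⟨j, hj, hje⟩ := hvt
      have hjlt : j < s.length := by omega
      have hji : j < i := by omega
      have hch' : List.IsChain (pvE' adj r) (s[j]'hjlt :: l') := by
        rw [show s[j]'hjlt = v by rw [← hje]]
        exact hcc.2
      have := ihn j hjlt (by omega) l' hch'
      simp only [List.length_cons]
      omega

theorem pvRanked_sound_mem (adj : PySem.Dict String (List String)) (r : String) (s : List String)
    (hr : pvRanked adj r s) (u : String) (hu : u ∈ s) :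
    ∀ l, List.IsChain (pvE' adj r) (u :: l) → l.length < s.length := by
  intro l hch
  obtain ⟨i, hi, he⟩ := List.mem_iff_getElem.mp hu
  have := pvRanked_sound adj r s hr i i hi le_rfl l (he ▸ hch)
  omega

theorem pvFix_complete (adj : PySem.Dict String (List String)) (r : String)
    (rem : List String) (hsub : ∀ u v, v ∈ pvSuccP adj r u → v ∈ rem)
    (S : PySem.Set String) (hfix : (pvPassB adj r rem (S, false)).1 = S) :
    ∀ (j : Nat) (u : String), u ∈ rem →
      (¬ ∃ l, List.IsChain (pvE' adj r) (u :: l) ∧ l.length = j) → u ∈ S := by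
  intro j
  induction j with
  | zero =>
    intro u _ hno
    exact absurd ⟨[], List.isChain_singleton u, rfl⟩ hno
  | succ j ihj =>
    intro u hu hno
    have hsucc : ∀ v ∈ pvSuccP adj r u, v ∈ S := by
      intro v hv
      apply ihj v (hsub u v hv)
      rintro ⟨l, hch, hlen⟩
      exact hno ⟨v :: l, List.isChain_cons_cons.mpr ⟨hv, hch⟩, by simp [hlen]⟩
    have := pvPassB_reach adj r rem (S, false) u hu (Or.inr hsucc)
    rwa [hfix] at this

theorem pvRoundsB_inv (adj : PySem.Dict String (List String)) (r : String) (rem : List String) :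
    ∀ (k : Nat) (s : PySem.Set String), pvRanked adj r s → s.Nodup → (∀ y ∈ s, y ∈ rem) →
      (pvRanked adj r (pvRoundsB adj r rem k s) ∧ (pvRoundsB adj r rem k s).Nodup
        ∧ (∀ y ∈ pvRoundsB adj r rem k s, y ∈ rem))
      ∧ ((pvPassB adj r rem (pvRoundsB adj r rem k s, false)).1 = pvRoundsB adj r rem k s
          ∨ s.length + k ≤ (pvRoundsB adj r rem k s).length) := by
  intro k
  induction k with
  | zero =>
    intro s h1 h2 h3
    exact ⟨⟨h1, h2, h3⟩, Or.inr (by simp [pvRoundsB])⟩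
  | succ k ihk =>
    intro s h1 h2 h3
    have hrk := pvPassB_ranked adj r rem (s, false) h1 h2
    obtain ⟨t, ht, hts⟩ := pvPassB_append adj r rem (s, false)
    have hsub' : ∀ y ∈ (pvPassB adj r rem (s, false)).1, y ∈ rem := by
      intro y hy
      rw [ht] at hy
      rcases List.mem_append.mp hy with hy | hy
      · exact h3 y hy
      · exact hts y hy
    show (pvRanked adj r (pvRoundsB adj r rem (k+1) s) ∧ _ ∧ _) ∧ _
    rw [show pvRoundsB adj r rem (k+1) s =
        (if (pvPassB adj r rem (s, false)).2 then
          pvRoundsB adj r rem k (pvPassB adj r rem (s, false)).1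
        else (pvPassB adj r rem (s, false)).1) from rfl]
    cases hfl : (pvPassB adj r rem (s, false)).2 with
    | true =>
      rw [if_pos rfl]
      have hres := ihk (pvPassB adj r rem (s, false)).1 hrk.1 hrk.2 hsub'
      refine ⟨hres.1, ?_⟩
      rcases hres.2 with h | h
      · exact Or.inl h
      · right
        rcases pvPassB_growth adj r rem (s, false) hfl with hcon | hlt
        · cases hcon
        · have hlt' : s.length < (pvPassB adj r rem (s, false)).1.length := hlt
          omega
    | false =>
      rw [if_neg Bool.false_ne_true]
      have heq : (pvPassB adj r rem (s, false)).1 = s := pvPassB_flag_false adj r rem (s, false) hfl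
      refine ⟨⟨by rw [heq]; exact h1, by rw [heq]; exact h2, by rw [heq]; exact h3⟩, Or.inl ?_⟩
      rw [heq]
      exact heq

theorem pvAcyclic_iff (adj : PySem.Dict String (List String)) (r : String) (rem : List String)
    (hnd : rem.Nodup) (hsub : ∀ u v, v ∈ pvSuccP adj r u → v ∈ rem) :
    (PySem.Set.len (pvRoundsB adj r rem rem.length PySem.Set.empty) == rem.length) = true ↔
      ¬ ∃ u l, u ∈ rem ∧ List.IsChain (pvE' adj r) (u :: l) ∧ l.length = rem.length := by
  have hinv := pvRoundsB_inv adj r rem rem.length PySem.Set.empty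
    (by intro i hi; simp at hi) List.nodup_nil (by intro y hy; simp at hy)
  set S := pvRoundsB adj r rem rem.length PySem.Set.empty with hS
  obtain ⟨⟨hrk, hnd', hsub'⟩, hfx⟩ := hinv
  have hlen_le : S.length ≤ rem.length :=
    (List.subperm_of_subset hnd' hsub').length_le
  -- S is always a fixpoint of the pass
  have hfix : (pvPassB adj r rem (S, false)).1 = S := by
    rcases hfx with h | h
    · exact h
    · have hleq : S.length = rem.length := by simp at h; omega
      have hall : ∀ u ∈ rem, u ∈ S := by
        have hperm : S.Perm rem := List.Subperm.perm_of_length_le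
          (List.subperm_of_subset hnd' hsub') (by omega)
        intro u hu
        exact hperm.mem_iff.mpr hu
      rw [pvFull_fix adj r rem S hall]
  constructor
  · intro hchk
    have hleq : S.length = rem.length := by
      rw [beq_iff_eq] at hchk
      unfold PySem.Set.len at hchk
      omega
    rintro ⟨u, l, hu, hch, hlen⟩
    have huS : u ∈ S := by
      have hperm : S.Perm rem := List.Subperm.perm_of_length_le
        (List.subperm_of_subset hnd' hsub') (by omega)
      exact hperm.mem_iff.mpr hu
    have := pvRanked_sound_mem adj r S hrk u huS l hch
    omega
  · intro hno
    have hall : ∀ u ∈ rem, u ∈ S := by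
      intro u hu
      apply pvFix_complete adj r rem hsub S hfix rem.length u hu
      rintro ⟨l, hch, hlen⟩
      exact hno ⟨u, l, hu, hch, hlen⟩
    have hge : rem.length ≤ S.length :=
      (List.subperm_of_subset hnd hall).length_le
    rw [beq_iff_eq]
    unfold PySem.Set.len
    omega

-- ---- bridge ----

theorem pvFind?_filter_ne (r x : String) (hxr : x ≠ r) :
    ∀ (items : List (String × String)),
      List.find? (fun p => p.1 == x) (items.filter (fun p => !(p.1 == r)))
        = List.find? (fun p => p.1 == x) items := by
  intro items
  induction items with
  | nil => simp
  | cons p t ih =>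
    by_cases hpr : p.1 = r
    · rw [List.filter_cons_of_neg (by simp [hpr]), List.find?_cons_of_neg (by simp [hpr]; exact fun he => hxr he.symm), ih]
    · rw [List.filter_cons_of_pos (by simp [hpr])]
      by_cases hpx : p.1 = x
      · rw [List.find?_cons_of_pos (by simp [hpx]), List.find?_cons_of_pos (by simp [hpx])]
      · rw [List.find?_cons_of_neg (by simp [hpx]), List.find?_cons_of_neg (by simp [hpx]), ih]

theorem pvGet?_erase (d : PySem.Dict String String) (r x : String) :
    (d.erase r).get? x = if x = r then none else d.get? x := by
  show (Option.map (fun q => q.2) (List.find? (fun p => p.1 == x)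
      (d.items.filter (fun p => !(p.1 == r))))) = _
  by_cases hxr : x = r
  · subst hxr
    rw [if_pos rfl]
    rw [List.find?_eq_none.mpr]
    · rfl
    · intro p hp
      have := List.of_mem_filter hp
      simp only [Bool.not_eq_true'] at this
      simp [this]
  · rw [if_neg hxr, pvFind?_filter_ne r x hxr]
    rfl

theorem pvKeys_erase (d : PySem.Dict String String) (r : String) :
    (d.erase r).keys = d.keys.filter (fun u => u != r) := by
  show (d.items.filter (fun p => !(p.1 == r))).map (fun p => p.1)
      = (d.items.map (fun p => p.1)).filter (fun u => u != r)
  induction d.items with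
  | nil => rfl
  | cons p t ih =>
    by_cases hpr : p.1 = r
    · rw [List.filter_cons_of_neg (by simp [hpr]), List.map_cons,
        List.filter_cons_of_neg (by simp [hpr]), ih]
    · rw [List.filter_cons_of_pos (by simp [hpr]), List.map_cons, List.map_cons,
        List.filter_cons_of_pos (by simp [hpr]), ih]

theorem pvBuildAdj_items (d : PySem.Dict String String) (hnd : d.keys.Nodup) :
    (pvBuildAdj d).items = d.items.map (fun p => (p.1, pvAdjRow d p.2)) := by
  unfold pvBuildAdj
  have := PySem.Dict.items_foldl_insert_fresh (l := d.items) (k := fun p => p.1)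
    (v := fun p => pvAdjRow d p.2) (d := PySem.Dict.empty)
    (by intro a _; rfl) (by exact hnd)
  simpa using this

theorem pvBuildAdj_getD (d : PySem.Dict String String) (hnd : d.keys.Nodup) (u : String) :
    (pvBuildAdj d).getD u [] = (match d.get? u with
      | none => []
      | some f => pvAdjRow d f) := by
  have hitems := pvBuildAdj_items d hnd
  have hkeys : (pvBuildAdj d).keys = d.keys := by
    show (pvBuildAdj d).items.map (fun p => p.1) = d.items.map (fun p => p.1)
    rw [hitems, List.map_map]
    rfl
  cases hg : d.get? u with
  | none =>
    have hk : u ∉ d.keys := (PySem.Dict.get?_eq_none_iff_not_mem_keys d u).mp hg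
    apply PySem.Dict.getD_of_not_contains
    cases hc : (pvBuildAdj d).contains u with
    | false => rfl
    | true =>
      exfalso
      have := (PySem.Dict.contains_iff_mem_keys (pvBuildAdj d) u).mp hc
      rw [hkeys] at this
      exact hk this
  | some f =>
    have hmem : (u, f) ∈ d.items := PySem.Dict.mem_items_of_get?_eq_some d hg
    have hmem' : (u, pvAdjRow d f) ∈ (pvBuildAdj d).items := by
      rw [hitems]
      exact List.mem_map.mpr ⟨(u, f), hmem, rfl⟩
    exact PySem.Dict.getD_of_mem_items (pvBuildAdj d) hmem' (by rw [hkeys]; exact hnd) []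

theorem pvSuccP_eq_pvAdjE (d : PySem.Dict String String) (hnd : d.keys.Nodup) (r u : String)
    (hu : u ∈ (d.erase r).keys) :
    pvSuccP (pvBuildAdj d) r u = pvAdjE (d.erase r) u := by
  rw [pvKeys_erase] at hu
  have hur : u ≠ r := by
    have := List.of_mem_filter hu
    simpa using this
  have huk : u ∈ d.keys := List.mem_of_mem_filter hu
  have hg : ∃ f, d.get? u = some f := by
    cases hgu : d.get? u with
    | none => exact absurd ((PySem.Dict.get?_eq_none_iff_not_mem_keys d u).mp hgu) (by simp [huk])
    | some f => exact ⟨f, rfl⟩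
  obtain ⟨f, hf⟩ := hg
  unfold pvSuccP pvAdjE
  rw [pvBuildAdj_getD d hnd u, hf, pvGet?_erase, if_neg hur, hf]
  unfold pvAdjRow
  rw [List.filter_filter]
  apply List.filter_congr
  intro v _
  rw [pvGet?_erase]
  by_cases hvr : v = r
  · rw [if_pos hvr]
    simp [hvr]
  · rw [if_neg hvr]
    rw [PySem.Dict.contains_eq_isSome_get?]
    simp [hvr]

theorem pvChain_transfer (adj : PySem.Dict String (List String)) (r : String)
    (d' : PySem.Dict String String)
    (h : ∀ u ∈ d'.keys, pvSuccP adj r u = pvAdjE d' u) :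
    ∀ (l : List String) (u : String), u ∈ d'.keys →
      (List.IsChain (pvE' adj r) (u :: l) ↔ List.IsChain (pvEdge d') (u :: l)) := by
  intro l
  induction l with
  | nil => intro u _; simp
  | cons v l' ih =>
    intro u hu
    rw [List.isChain_cons_cons, List.isChain_cons_cons]
    have hedge : pvE' adj r u v ↔ pvEdge d' u v := by
      unfold pvE' pvEdge
      rw [h u hu]
    constructor
    · rintro ⟨h1, h2⟩
      have hv : v ∈ d'.keys := (pvEdge_tgt d' u v (hedge.mp h1)).1
      exact ⟨hedge.mp h1, (ih v hv).mp h2⟩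
    · rintro ⟨h1, h2⟩
      have hv : v ∈ d'.keys := (pvEdge_tgt d' u v h1).1
      exact ⟨hedge.mpr h1, (ih v hv).mpr h2⟩

theorem pvHsub (d : PySem.Dict String String) (hnd : d.keys.Nodup) (r : String) :
    ∀ u v, v ∈ pvSuccP (pvBuildAdj d) r u → v ∈ d.keys.filter (fun w => w != r) := by
  intro u v hv
  unfold pvSuccP at hv
  have hvr : (v != r) = true := (List.mem_filter.mp hv).2
  have hvm : v ∈ (pvBuildAdj d).getD u [] := (List.mem_filter.mp hv).1
  rw [pvBuildAdj_getD d hnd u] at hvm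
  cases hg : d.get? u with
  | none => rw [hg] at hvm; simp at hvm
  | some f =>
    rw [hg] at hvm
    have hvc : d.contains v = true := (List.mem_filter.mp hvm).2
    have : v ∈ d.keys := (PySem.Dict.contains_iff_mem_keys d v).mp hvc
    exact List.mem_filter.mpr ⟨this, hvr⟩

theorem pvCond_eq (d : PySem.Dict String String) (hnd : d.keys.Nodup) (node : String) :
    (!(pvHasFeedbackLoop (d.erase node))) = pvAcyclicWithout (pvBuildAdj d) d.keys node := by
  have hkeys' : (d.erase node).keys = d.keys.filter (fun u => u != node) := pvKeys_erase d node
  have hnd' : (d.erase node).keys.Nodup := by rw [hkeys']; exact hnd.filter _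
  have hndrem : (d.keys.filter (fun u => u != node)).Nodup := hnd.filter _
  have hA := pvHasFeedbackLoop_iff (d.erase node) hnd'
  have hB := pvAcyclic_iff (pvBuildAdj d) node (d.keys.filter (fun u => u != node)) hndrem
    (pvHsub d hnd node)
  have hcorr : ∀ w ∈ (d.erase node).keys,
      pvSuccP (pvBuildAdj d) node w = pvAdjE (d.erase node) w :=
    fun w hw => pvSuccP_eq_pvAdjE d hnd node w hw
  have hACW : pvAcyclicWithout (pvBuildAdj d) d.keys node
      = (PySem.Set.len (pvRoundsB (pvBuildAdj d) node (d.keys.filter (fun u => u != node))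
          (d.keys.filter (fun u => u != node)).length PySem.Set.empty)
        == ((d.keys.filter (fun u => u != node)).length : Int)) := rfl
  rw [Bool.eq_iff_iff]
  constructor
  · intro hnb
    rw [Bool.not_eq_true'] at hnb
    rw [hACW, hB]
    rintro ⟨u, l, hu, hch, hlen⟩
    have hu' : u ∈ (d.erase node).keys := by rw [hkeys']; exact hu
    have hch' := (pvChain_transfer (pvBuildAdj d) node (d.erase node) hcorr l u hu').mp hch
    have hlong : pvHasLong (d.erase node) := ⟨u, l, hu', hch', by rw [hkeys']; exact hlen⟩
    rw [← hA] at hlong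
    rw [hnb] at hlong
    cases hlong
  · intro hacy
    rw [Bool.not_eq_true']
    cases hl : pvHasFeedbackLoop (d.erase node) with
    | false => rfl
    | true =>
      exfalso
      obtain ⟨u, l, hu', hch', hlen'⟩ := hA.mp hl
      rw [hACW, hB] at hacy
      apply hacy
      have hu : u ∈ d.keys.filter (fun u => u != node) := by rw [← hkeys']; exact hu'
      exact ⟨u, l, hu, (pvChain_transfer (pvBuildAdj d) node (d.erase node) hcorr l u hu').mpr hch',
        by rw [← hkeys']; exact hlen'⟩

theorem pvFoldAddIf (c : String → Bool) :
    ∀ (l : List String) (s : PySem.Set String),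
      l.foldl (fun fvs node => if c node then PySem.Set.add fvs node else fvs) s
        = (l.filter c).foldl PySem.Set.add s := by
  intro l
  induction l with
  | nil => intro s; rfl
  | cons x t ih =>
    intro s
    rw [List.foldl_cons]
    cases hc : c x with
    | true => rw [if_pos rfl, List.filter_cons_of_pos hc, List.foldl_cons, ih]
    | false => rw [if_neg Bool.false_ne_true, List.filter_cons_of_neg (by simp [hc]), ih]

-- ===== VERDICT (by name: the statement is the Claim_ definition above) =====
theorem compute_fvs_spec : Claim_equal_compute_fvs := by
  intro bn _
  unfold Spec_compute_fvs
  show compute_fvs bn = compute_fvs_alt bn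
  show (PySem.Dict.ofList bn).keys.foldl
      (fun fvs node => if !(pvHasFeedbackLoop ((PySem.Dict.ofList bn).erase node))
        then PySem.Set.add fvs node else fvs) PySem.Set.empty
    = PySem.Set.ofList ((PySem.Dict.ofList bn).keys.filter
        (fun node => pvAcyclicWithout (pvBuildAdj (PySem.Dict.ofList bn))
          (PySem.Dict.ofList bn).keys node))
  rw [pvFoldAddIf, PySem.Set.ofList_eq_foldl]
  congr 1
  apply List.filter_congr
  intro node _
  exact pvCond_eq (PySem.Dict.ofList bn) (PySem.Dict.nodup_keys_ofList bn) node
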